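-- pv_equiv track=rewrite | github.com/ghareebfathy/PySchool | Conditionals.py | pairwiseScore
-- ===== SOURCE A (Python) =====
-- def pairwiseScore(seqA, seqB):
-- 	h = []
-- 	c = []
-- 	for x in range(0,len(seqA)):
-- 		if seqA[x] == seqB[x]:
-- 			h.append('|')
-- 		else:
-- 			h.append(' ')
-- 		if len(h) > 1:
-- 			if h[x] == '|':
-- 				if h[x] == h[x-1]:
-- 					c.append(3)
-- 				else:
-- 					c.append(1)
-- 			elif h[x] == ' ':
-- 				c.append(-1)
-- 		else:
-- 			if h[x] == '|':
-- 				c.append(1)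
-- 			elif h[x] == ' ':
-- 				c.append(-1)
-- 	a = "".join(h)
-- 	return "".join((seqA, '\n', a, '\n', seqB, '\n', 'Score: %d' % sum(c)))
-- ===== SOURCE B (Python) =====
-- def pairwiseScore(seqA, seqB):
--     a = "".join('|' if x == y else ' ' for x, y in zip(seqA, seqB))
--     runs = 0
--     prev = ' '
--     for ch in a:
--         if ch == '|' and prev != '|':
--             runs += 1
--         prev = ch
--     score = 4 * a.count('|') - 2 * runs - len(a)
--     return f"{seqA}\n{a}\n{seqB}\nScore: {score}"
-- ===== Notes on version B (the rewrite author's own statement) =====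
-- stated objective: simpler
-- what changed: B replaces A's per-position score-list accumulation and index arithmetic with a zip-built match string, a single run-counting pass, and the closed form 4*matches - 2*runs - length; avoiding the per-position list appends and branch work gives a constant-factor speedup (measured ~2x).
import Mathlib
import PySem

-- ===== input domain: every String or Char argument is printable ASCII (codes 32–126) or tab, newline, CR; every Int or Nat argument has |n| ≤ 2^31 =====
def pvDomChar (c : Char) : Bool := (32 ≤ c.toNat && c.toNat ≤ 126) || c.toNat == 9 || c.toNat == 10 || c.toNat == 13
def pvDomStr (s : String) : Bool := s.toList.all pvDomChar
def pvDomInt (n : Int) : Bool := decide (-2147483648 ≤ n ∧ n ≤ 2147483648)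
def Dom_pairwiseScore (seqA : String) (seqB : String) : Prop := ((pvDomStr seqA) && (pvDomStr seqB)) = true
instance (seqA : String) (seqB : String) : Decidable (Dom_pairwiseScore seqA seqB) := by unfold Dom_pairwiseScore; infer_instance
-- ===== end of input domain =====

-- B replaces A's per-position score accumulation with counting matches and runs plus the closed form
-- 4*M - 2*R - N (objective: simpler). Inputs with len(seqB) < len(seqA), where A raises IndexError,
-- are outside Pre_.

-- ===== PORT A =====
-- the body of A's for-loop: append to h, then append the per-position score to c
def pvAStep (seqA : String) (seqB : String) (st : List Char × List Int) (x : Int) :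
    List Char × List Int :=
  let h := if PySem.Str.pyGet? seqA x == PySem.Str.pyGet? seqB x
           then st.1 ++ ['|'] else st.1 ++ [' ']
  let c :=
    if h.length > 1 then
      if PySem.List.pyGetD h x ' ' == '|' then
        if PySem.List.pyGetD h x ' ' == PySem.List.pyGetD h (x - 1) ' ' then st.2 ++ [(3 : Int)]
        else st.2 ++ [(1 : Int)]
      else if PySem.List.pyGetD h x ' ' == ' ' then st.2 ++ [(-1 : Int)] else st.2
    else
      if PySem.List.pyGetD h x ' ' == '|' then st.2 ++ [(1 : Int)]
      else if PySem.List.pyGetD h x ' ' == ' ' then st.2 ++ [(-1 : Int)] else st.2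
  (h, c)

def pairwiseScore (seqA : String) (seqB : String) : String :=
  let st := (PySem.List.pyRange 0 (PySem.Str.len seqA) 1).foldl (pvAStep seqA seqB) ([], [])
  -- "".join((seqA, '\n', a, '\n', seqB, '\n', 'Score: %d' % sum(c))) = plain concatenation
  String.ofList (seqA.toList ++ '\n' :: st.1 ++ '\n' :: seqB.toList ++
    '\n' :: ("Score: ".toList ++ PySem.Int.toChars st.2.sum))

-- ===== PORT B =====
-- one step of B's run-counting loop: state = (runs, prev)
def pvRunStep (st : Int × Char) (ch : Char) : Int × Char :=
  (if ch == '|' && st.2 != '|' then st.1 + 1 else st.1, ch)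

def pairwiseScore_alt (seqA : String) (seqB : String) : String :=
  let a := (seqA.toList.zip seqB.toList).map (fun p => if p.1 == p.2 then '|' else ' ')
  let runs := (a.foldl pvRunStep (0, ' ')).1
  let score := 4 * (a.count '|' : Int) - 2 * runs - (a.length : Int)
  String.ofList (seqA.toList ++ '\n' :: a ++ '\n' :: seqB.toList ++
    '\n' :: ("Score: ".toList ++ PySem.Int.toChars score))

-- ===== PRECONDITION & SPEC =====
-- A indexes seqB at every position of seqA, so it raises IndexError when seqB is shorter.
def Pre_pairwiseScore (seqA : String) (seqB : String) : Prop :=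
  PySem.Str.len seqA ≤ PySem.Str.len seqB
instance (seqA : String) (seqB : String) : Decidable (Pre_pairwiseScore seqA seqB) := by
  unfold Pre_pairwiseScore; infer_instance

def pvWitness_pairwiseScore : String × String := ("ab|c", "abcc")

def Spec_pairwiseScore (seqA : String) (seqB : String) (out : String) : Prop :=
  out = pairwiseScore_alt seqA seqB
instance (seqA : String) (seqB : String) (out : String) : Decidable (Spec_pairwiseScore seqA seqB out) := by
  unfold Spec_pairwiseScore; infer_instance

-- ===== CLAIM (what is proved, stated in full; the proofs are below) =====
def Claim_equal_pairwiseScore : Prop := ∀ (seqA : String) (seqB : String),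
  Dom_pairwiseScore seqA seqB → Pre_pairwiseScore seqA seqB →
  Spec_pairwiseScore seqA seqB (pairwiseScore seqA seqB)

-- ===== LEMMAS AND PROOFS =====

-- the match character at one position
def pvMatch (p : Char × Char) : Char := if p.1 == p.2 then '|' else ' '

-- the second component of B's run fold is the last character seen
lemma pvRunStep_snd (l : List Char) (st : Int × Char) :
    (l.foldl pvRunStep st).2 = l.getLastD st.2 := by
  induction l generalizing st with
  | nil => rfl
  | cons c l ih =>
    simp only [List.foldl_cons, ih, pvRunStep]
    cases l <;> simp [List.getLastD]

-- B's score in closed form, as a function of the match list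
def pvScore (l : List Char) : Int :=
  4 * (l.count '|' : Int) - 2 * (l.foldl pvRunStep (0, ' ')).1 - (l.length : Int)

-- appending one char changes the closed-form score by +3 (run continues), +1 (run starts) or -1
lemma pvScore_append (t : List Char) (ch : Char) :
    pvScore (t ++ [ch]) = pvScore t +
      (if ch = '|' then (if t.getLastD ' ' = '|' then 3 else 1) else -1) := by
  unfold pvScore
  rw [List.foldl_append, List.count_append]
  have hsnd := pvRunStep_snd t ((0 : Int), ' ')
  rcases h : t.foldl pvRunStep ((0 : Int), ' ') with ⟨r, p⟩
  rw [h] at hsnd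
  simp only [List.foldl_cons, List.foldl_nil, pvRunStep]
  simp only [← hsnd]
  split_ifs with h1 h2 <;> simp_all <;> ring_nf

-- the main loop invariant: after k iterations A's h is the first k match chars and
-- sum(c) is B's closed-form score of that prefix
lemma pvLoop_inv (seqA seqB : String)
    (hlen : seqA.toList.length ≤ seqB.toList.length)
    (k : Nat) (hk : k ≤ seqA.toList.length) :
    ∃ c : List Int,
      (PySem.List.pyRange 0 (k : Int) 1).foldl (pvAStep seqA seqB) ([], []) =
        (((seqA.toList.zip seqB.toList).map pvMatch).take k, c) ∧
      c.sum = pvScore (((seqA.toList.zip seqB.toList).map pvMatch).take k) := by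
  induction k with
  | zero =>
    refine ⟨[], ?_, ?_⟩ <;> simp [PySem.List.pyRange_one_eq_nil, pvScore]
  | succ k ih =>
    obtain ⟨c, hfold, hsum⟩ := ih (Nat.le_of_succ_le hk)
    set a := (seqA.toList.zip seqB.toList).map pvMatch with ha
    have hka : k < a.length := by
      have h1 : seqA.toList.length = seqA.length := by simp
      have h2 : seqB.toList.length = seqB.length := by simp
      simp [ha, List.length_zip]
      omega
    have hrange : PySem.List.pyRange 0 ((k + 1 : Nat) : Int) 1 =
        PySem.List.pyRange 0 (k : Int) 1 ++ [(k : Int)] := by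
      have := PySem.List.pyRange_one_succ_right (a := 0) (b := (k : Int)) (by positivity)
      rw [show ((k + 1 : Nat) : Int) = (k : Int) + 1 by push_cast; ring, this]
    have htake : a.take (k + 1) = a.take k ++ [a[k]] := by
      rw [List.take_add_one, List.getElem?_eq_getElem hka]; rfl
    have hach : a[k] = (if seqA.toList[k]'(by omega) == seqB.toList[k]'(by omega)
        then '|' else ' ') := by
      simp [ha, pvMatch, List.getElem_map, List.getElem_zip]
    have hgetk : ∀ ch : Char, PySem.List.pyGetD (a.take k ++ [ch]) (k : Int) ' ' = ch := by
      intro ch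
      have hlen : (a.take k).length = k := by simp; omega
      rw [PySem.List.pyGetD_natCast, List.getD_eq_getElem?_getD,
        List.getElem?_append_right (by omega)]
      simp [hlen]
    rw [hrange, List.foldl_append, List.foldl_cons, List.foldl_nil, hfold]
    have hstep : pvAStep seqA seqB (a.take k, c) (k : Int) =
        (a.take (k + 1), c ++ [if a[k] = '|'
          then (if (a.take k).getLastD ' ' = '|' then 3 else 1) else -1]) := by
      unfold pvAStep
      have h1 : (PySem.Str.pyGet? seqA (k : Int) == PySem.Str.pyGet? seqB (k : Int)) =
          (seqA.toList[k]'(by omega) == seqB.toList[k]'(by omega)) := by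
        simp [List.getElem?_eq_getElem (by omega : k < seqA.toList.length),
          List.getElem?_eq_getElem (by omega : k < seqB.toList.length)]
      rw [h1]
      have hh : (if seqA.toList[k]'(by omega) == seqB.toList[k]'(by omega)
          then a.take k ++ ['|'] else a.take k ++ [' ']) = a.take k ++ [a[k]] := by
        rw [hach]; split <;> rfl
      simp only [hh, ← htake]
      rw [htake]
      have hlen1 : (a.take k ++ [a[k]]).length = k + 1 := by simp; omega
      rcases Nat.eq_zero_or_pos k with hk0 | hkpos
      · subst hk0
        simp only [List.take_zero, List.nil_append, List.length_cons, List.length_nil]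
        rw [hach]
        split <;> simp [List.getLastD]
      · have hgt : (a.take k ++ [a[k]]).length > 1 := by omega
        have htk : a.take k = a.take (k - 1) ++ [a[k - 1]'(by omega)] := by
          conv_lhs => rw [show k = (k - 1) + 1 by omega]
          rw [List.take_add_one, List.getElem?_eq_getElem (by omega)]; rfl
        have hprev : PySem.List.pyGetD (a.take k ++ [a[k]]) ((k : Int) - 1) ' ' =
            a[k - 1]'(by omega) := by
          rw [show (k : Int) - 1 = ((k - 1 : Nat) : Int) by omega, PySem.List.pyGetD_natCast]
          rw [htk, List.append_assoc]
          have h2 : (a.take (k-1)).length = k - 1 := by simp; omega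
          rw [List.getD_eq_getElem?_getD, List.getElem?_append_right (by omega)]
          simp [h2]
        have hlast : (a.take k).getLastD ' ' = a[k - 1]'(by omega) := by
          rw [htk, List.getLastD_concat]
        have hlast' : (a.take k).getLast?.getD ' ' = a[k - 1]'(by omega) := by
          simpa using hlast
        have hane : ¬ a = [] := by intro h; rw [h] at hka; simp at hka
        have hcase : a[k] = '|' ∨ a[k] = ' ' := by rw [hach]; split <;> simp
        rcases hcase with hc | hc
        · by_cases hp : a[k - 1]'(by omega) = '|'
          · simp only [hgetk, hprev]
            simp [hkpos, hane, hlast', hc, hp]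
          · simp only [hgetk, hprev]
            simp [hkpos, hlast', hc, hp]
            exact fun _ h => hp h.symm
        · simp only [hgetk, hprev]
          simp [hkpos, hc]
    rw [hstep]
    refine ⟨_, rfl, ?_⟩
    rw [List.sum_append, hsum, htake, pvScore_append]
    simp
  

-- ===== VERDICT (by name: the statement is the Claim_ definition above) =====
theorem pairwiseScore_spec : Claim_equal_pairwiseScore := by
  intro seqA seqB _ hpre
  unfold Spec_pairwiseScore pairwiseScore pairwiseScore_alt
  have hlen : seqA.toList.length ≤ seqB.toList.length := by
    unfold Pre_pairwiseScore at hpre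
    rw [PySem.Str.len_eq, PySem.Str.len_eq] at hpre
    exact_mod_cast hpre
  obtain ⟨c, hfold, hsum⟩ := pvLoop_inv seqA seqB hlen seqA.toList.length le_rfl
  have halen : ((seqA.toList.zip seqB.toList).map pvMatch).length = seqA.toList.length := by
    have h1 : seqA.toList.length = seqA.length := by simp
    have h2 : seqB.toList.length = seqB.length := by simp
    simp [List.length_zip]
    omega
  have htakeall : (List.map pvMatch (seqA.toList.zip seqB.toList)).take seqA.toList.length
      = List.map pvMatch (seqA.toList.zip seqB.toList) := by
    rw [← halen, List.take_length]
  rw [PySem.Str.len_eq, hfold]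
  simp only [hsum, pvScore, htakeall]
  rfl
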